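-- pv_equiv track=rewrite | github.com/LuhangYang/exact_diagonalization | ED_SC_eta_pairing/hubbard_k_funcs.py | build_eta_basis
-- ===== SOURCE A (Python) =====
-- def IBITS(n,i): #count from right site from 0.
--     return ((n >> i) & 1)
--
-- def build_eta_basis(basis_k,L1):
--     basis_et = []
--     for state_basis in basis_k:
--         is_eta = 1
--         for bit in range(L1):
--             if(IBITS(state_basis,2*bit) != IBITS(state_basis,2*bit+1)):
--                 is_eta = 0
--                 continue
--         if(is_eta==1): basis_et.append(state_basis)
--     return basis_et
-- ===== SOURCE B (Python) =====
-- def build_eta_basis(basis_k, L1):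
--     # A state is an eta state iff the bits of every pair (2*bit, 2*bit+1)
--     # with bit < L1 agree, i.e. iff s ^ (s >> 1) has no set bit at any even
--     # position below 2*L1.  One precomputed mask (0b0101...01, closed form
--     # (4**L1 - 1)//3) turns the whole per-state bit loop into a single
--     # constant number of big-int operations.
--     mask = (4 ** L1 - 1) // 3 if L1 > 0 else 0
--     return [s for s in basis_k if (s ^ (s >> 1)) & mask == 0]
-- ===== Notes on version B (the rewrite author's own statement) =====
-- stated objective: faster
-- what changed: Replaces A's per-state loop over all L1 bit positions (with a flag and IBITS probes) by a single whole-word bitmask test (s ^ (s >> 1)) & mask == 0 against one precomputed even-bit mask (4**L1 - 1)//3, filtering by comprehension.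
import Mathlib
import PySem

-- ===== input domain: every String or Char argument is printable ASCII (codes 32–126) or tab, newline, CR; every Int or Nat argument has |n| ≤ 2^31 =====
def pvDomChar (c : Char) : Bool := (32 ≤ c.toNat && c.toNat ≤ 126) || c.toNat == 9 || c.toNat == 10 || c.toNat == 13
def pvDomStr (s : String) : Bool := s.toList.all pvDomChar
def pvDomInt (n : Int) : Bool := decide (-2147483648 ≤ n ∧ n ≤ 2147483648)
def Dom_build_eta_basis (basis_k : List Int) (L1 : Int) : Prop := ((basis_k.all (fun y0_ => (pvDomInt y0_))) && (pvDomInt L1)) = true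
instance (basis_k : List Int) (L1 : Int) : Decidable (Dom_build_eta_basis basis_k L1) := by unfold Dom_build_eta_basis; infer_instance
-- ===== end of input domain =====

-- B replaces A's per-state loop over all L1 bit positions by one whole-word
-- bitmask test (s ^ (s >> 1)) & mask == 0 against a precomputed even-bit mask.


-- ===== PORT A =====
-- IBITS is only ever applied to nonnegative shift amounts (2*bit, 2*bit+1 with
-- bit drawn from range(L1)); `.toNat` is exact there.
def IBITS (n : Int) (i : Int) : Int := PySem.Int.band (n >>> i.toNat) 1

def build_eta_basis (basis_k : List Int) (L1 : Int) : List Int :=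
  basis_k.foldl (fun basis_et state_basis =>
    let is_eta : Int :=
      (PySem.List.pyRange 0 L1 1).foldl (fun e bit =>
        if IBITS state_basis (2 * bit) ≠ IBITS state_basis (2 * bit + 1) then 0 else e) 1
    if is_eta = 1 then basis_et ++ [state_basis] else basis_et) []

-- ===== PORT B =====
-- mask = (4 ** L1 - 1) // 3 if L1 > 0 else 0; then one bitwise test per state.
def build_eta_basis_alt (basis_k : List Int) (L1 : Int) : List Int :=
  let mask : Int := if 0 < L1 then ((4 : Int) ^ L1.toNat - 1) / 3 else 0
  basis_k.filter (fun s =>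
    decide (PySem.Int.band (PySem.Int.bxor s (s >>> (1 : Nat))) mask = 0))

-- ===== PRECONDITION & SPEC =====
def Spec_build_eta_basis (basis_k : List Int) (L1 : Int) (out : List Int) : Prop := out = build_eta_basis_alt basis_k L1
instance (basis_k : List Int) (L1 : Int) (out : List Int) : Decidable (Spec_build_eta_basis basis_k L1 out) := by unfold Spec_build_eta_basis; infer_instance

-- ===== CLAIM =====
def Claim_equal_build_eta_basis : Prop := ∀ (basis_k : List Int) (L1 : Int), Dom_build_eta_basis basis_k L1 → Spec_build_eta_basis basis_k L1 (build_eta_basis basis_k L1)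

-- ===== LEMMAS AND PROOFS =====

-- The two bits of pair j of s agree (Python's  s>>2j & 1 == s>>(2j+1) & 1  as arithmetic)
def pairEq (s : Int) (j : Nat) : Prop :=
  PySem.Int.mod (s >>> (2 * j)) 2 = PySem.Int.mod (s >>> (2 * j + 1)) 2

-- the Nat whose bits are s's bits (s ≥ 0) or their complement (s < 0)
def nrep (s : Int) : Nat := if 0 ≤ s then s.toNat else (-s - 1).toNat

-- the even-bit mask 0b0101…01 with n ones, as a Nat
def emaskN : Nat → Nat
  | 0 => 0
  | n + 1 => 4 * emaskN n + 1

theorem mod_two_lit (t : Int) : PySem.Int.mod t 2 = t % 2 := by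
  simp [PySem.Int.mod, Int.fmod_eq_emod]

theorem emaskN_eq (n : Nat) : (4 : Int) ^ n - 1 = 3 * (emaskN n : Int) := by
  induction n with
  | zero => simp [emaskN]
  | succ m ih =>
    have : ((emaskN (m + 1) : Nat) : Int) = 4 * (emaskN m : Int) + 1 := by
      show ((4 * emaskN m + 1 : Nat) : Int) = _
      push_cast
      ring
    rw [this, pow_succ]
    linarith

theorem mask_closed (n : Nat) : ((4 : Int) ^ n - 1) / 3 = (emaskN n : Int) := by
  rw [emaskN_eq, Int.mul_ediv_cancel_left _ (by norm_num)]

theorem testBit_emaskN (n i : Nat) :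
    (emaskN n).testBit i = decide (i % 2 = 0 ∧ i < 2 * n) := by
  induction n generalizing i with
  | zero => simp [emaskN, Nat.zero_testBit]
  | succ m ih =>
    rcases i with _ | _ | k
    · rw [show emaskN (m + 1) = 4 * emaskN m + 1 from rfl, Nat.testBit_zero]
      simp only [decide_eq_decide, true_and]
      omega
    · rw [show emaskN (m + 1) = 4 * emaskN m + 1 from rfl,
          Nat.testBit_succ, Nat.testBit_zero]
      simp only [decide_eq_decide]
      omega
    · have h1 : (4 * emaskN m + 1) / 2 = 2 * emaskN m := by omega
      have h2 : (2 * emaskN m) / 2 = emaskN m := by omega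
      rw [show emaskN (m + 1) = 4 * emaskN m + 1 from rfl,
          Nat.testBit_succ, h1, Nat.testBit_succ, h2, ih]
      simp only [decide_eq_decide]
      omega

theorem and_eq_zero_iff (u M : Nat) :
    u &&& M = 0 ↔ ∀ i, ¬(u.testBit i = true ∧ M.testBit i = true) := by
  constructor
  · intro h i ⟨hu, hM⟩
    have := congrArg (fun x => Nat.testBit x i) h
    simp [Nat.testBit_and, hu, hM, Nat.zero_testBit] at this
  · intro h
    apply Nat.eq_of_testBit_eq
    intro i
    rw [Nat.testBit_and, Nat.zero_testBit]
    have := h i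
    cases hu : u.testBit i <;> cases hM : M.testBit i <;> simp_all

-- s ^ (s >> 1) is a Nat, whatever s's sign
theorem bxor_shift_eq (s : Int) :
    PySem.Int.bxor s (s >>> (1 : Nat)) = ((nrep s ^^^ (nrep s >>> 1) : Nat) : Int) := by
  rcases s with m | m
  · have h0 : (0 : Int) ≤ Int.ofNat m := Int.natCast_nonneg m
    have h1 : (0 : Int) ≤ Int.ofNat (m >>> 1) := Int.natCast_nonneg _
    have hn : nrep (Int.ofNat m) = m := by
      unfold nrep; rw [if_pos h0]; exact Int.toNat_natCast m
    rw [show (Int.ofNat m) >>> (1 : Nat) = Int.ofNat (m >>> 1) from rfl,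
        PySem.Int.bxor, if_pos h0, if_pos h1, hn]
    rfl
  · have h0 : ¬ (0 ≤ Int.negSucc m) := by
      have := Int.negSucc_lt_zero m; omega
    have e0 : (-(Int.negSucc m) - 1).toNat = m := by
      rw [Int.negSucc_eq]; omega
    have e1 : (-(Int.negSucc (m >>> 1)) - 1).toNat = m >>> 1 := by
      rw [Int.negSucc_eq]; omega
    have en : nrep (Int.negSucc m) = m := by
      unfold nrep; rw [if_neg h0, e0]
    rw [show (Int.negSucc m) >>> (1 : Nat) = Int.negSucc (m >>> 1) from rfl,
        PySem.Int.bxor, if_neg h0]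
    split
    · next hpos => have := Int.negSucc_lt_zero (m >>> 1); omega
    · rw [e0, e1, en]

theorem testBit_as_parity (m k : Nat) : m.testBit k = decide ((m >>> k) % 2 = 1) :=
  calc m.testBit k = m.testBit (k + 0) := by rw [Nat.add_zero]
    _ = (m >>> k).testBit 0 := (Nat.testBit_shiftRight m).symm
    _ = decide ((m >>> k) % 2 = 1) := Nat.testBit_zero _

-- pairEq through the bits of nrep
theorem pairEq_iff_testBit (s : Int) (j : Nat) :
    pairEq s j ↔ ((nrep s).testBit (2 * j) = (nrep s).testBit (2 * j + 1)) := by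
  have key : ∀ (k : Nat), PySem.Int.mod (s >>> k) 2 =
      (if 0 ≤ s then ((nrep s >>> k) % 2 : Nat) else 1 - ((nrep s >>> k) % 2 : Nat)) := by
    intro k
    rcases s with m | m
    · have h0 : (0 : Int) ≤ Int.ofNat m := Int.natCast_nonneg m
      have hn : nrep (Int.ofNat m) = m := by
        unfold nrep; rw [if_pos h0]; exact Int.toNat_natCast m
      rw [show (Int.ofNat m) >>> k = ((m >>> k : Nat) : Int) from rfl,
          mod_two_lit, if_pos h0, hn]
      generalize m >>> k = t
      push_cast
      omega
    · have h0 : ¬ (0 ≤ Int.negSucc m) := by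
        have := Int.negSucc_lt_zero m; omega
      have hn : nrep (Int.negSucc m) = m := by
        unfold nrep; rw [if_neg h0, Int.negSucc_eq]; omega
      rw [show (Int.negSucc m) >>> k = Int.negSucc (m >>> k) from rfl,
          mod_two_lit, if_neg h0, hn, Int.negSucc_eq]
      generalize m >>> k = t
      omega
  unfold pairEq
  rw [key, key, testBit_as_parity, testBit_as_parity]
  have a2 : (nrep s >>> (2 * j)) % 2 < 2 := Nat.mod_lt _ (by norm_num)
  have b2 : (nrep s >>> (2 * j + 1)) % 2 < 2 := Nat.mod_lt _ (by norm_num)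
  split_ifs <;>
    · simp only [decide_eq_decide]
      omega

-- B's per-state test, characterised
theorem mask_test_iff (s : Int) (n : Nat) :
    PySem.Int.band (PySem.Int.bxor s (s >>> (1 : Nat))) (emaskN n : Int) = 0 ↔
      ∀ j < n, pairEq s j := by
  rw [bxor_shift_eq, PySem.Int.band_natCast]
  rw [show ((0 : Int) = ((0 : Nat) : Int)) from rfl, Int.natCast_inj]
  rw [and_eq_zero_iff]
  constructor
  · intro h j hj
    rw [pairEq_iff_testBit]
    have := h (2 * j)
    rw [Nat.testBit_xor, Nat.testBit_shiftRight, testBit_emaskN] at this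
    by_contra hne
    apply this
    constructor
    · cases hb : (nrep s).testBit (2 * j) <;>
        cases hb' : (nrep s).testBit (1 + 2 * j) <;>
        simp_all [show 1 + 2 * j = 2 * j + 1 from by omega]
    · simp only [decide_eq_true_eq]; omega
  · intro h i
    rintro ⟨hu, hM⟩
    rw [testBit_emaskN, decide_eq_true_eq] at hM
    obtain ⟨hev, hlt⟩ := hM
    obtain ⟨j, rfl⟩ : ∃ j, i = 2 * j := ⟨i / 2, by omega⟩
    have hp := (pairEq_iff_testBit s j).mp (h j (by omega))
    rw [Nat.testBit_xor, Nat.testBit_shiftRight,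
        show 1 + 2 * j = 2 * j + 1 from by omega, hp] at hu
    simp at hu

-- ===== A-side characterisation (flag fold) =====

theorem flag_fold_zero (s : Int) (l : List Int) :
    l.foldl (fun e bit =>
      if IBITS s (2 * bit) ≠ IBITS s (2 * bit + 1) then 0 else e) (0 : Int) = 0 := by
  induction l with
  | nil => rfl
  | cons b t ih => simpa [List.foldl_cons, ite_self] using ih

theorem flag_fold_one (s : Int) (l : List Int) :
    (l.foldl (fun e bit =>
      if IBITS s (2 * bit) ≠ IBITS s (2 * bit + 1) then 0 else e) (1 : Int) = 1)
      ↔ ∀ bit ∈ l, IBITS s (2 * bit) = IBITS s (2 * bit + 1) := by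
  induction l with
  | nil => simp
  | cons b t ih =>
    simp only [List.foldl_cons, List.mem_cons]
    by_cases hb : IBITS s (2 * b) = IBITS s (2 * b + 1)
    · simp only [if_neg (not_not_intro hb), ih]
      constructor
      · intro hall bit hbit
        rcases hbit with rfl | hmem
        · exact hb
        · exact hall bit hmem
      · intro hall bit hmem; exact hall bit (Or.inr hmem)
    · simp only [if_pos hb, flag_fold_zero]
      constructor
      · intro h01; cases h01
      · intro hall; exact absurd (hall b (Or.inl rfl)) hb

theorem IBITS_eq_mod (s : Int) (i : Int) : IBITS s i = PySem.Int.mod (s >>> i.toNat) 2 := by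
  unfold IBITS; exact PySem.Int.band_one _

theorem IBITS_pair_iff (s : Int) (bit : Int) (hb : 0 ≤ bit) :
    IBITS s (2 * bit) = IBITS s (2 * bit + 1) ↔ pairEq s bit.toNat := by
  unfold pairEq
  rw [IBITS_eq_mod, IBITS_eq_mod,
      show (2 * bit).toNat = 2 * bit.toNat from by omega,
      show (2 * bit + 1).toNat = 2 * bit.toNat + 1 from by omega]

theorem flag_iff_pairs (s : Int) (L1 : Int) :
    ((PySem.List.pyRange 0 L1 1).foldl (fun e bit =>
      if IBITS s (2 * bit) ≠ IBITS s (2 * bit + 1) then 0 else e) (1 : Int) = 1)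
      ↔ ∀ j < L1.toNat, pairEq s j := by
  rw [flag_fold_one]
  constructor
  · intro hall j hj
    have hmem : (j : Int) ∈ PySem.List.pyRange 0 L1 1 := by
      rw [PySem.List.mem_pyRange_one]; omega
    have := hall (j : Int) hmem
    rwa [IBITS_pair_iff s (j : Int) (by positivity), Int.toNat_natCast] at this
  · intro hall bit hmem
    rw [PySem.List.mem_pyRange_one] at hmem
    rw [IBITS_pair_iff s bit hmem.1]
    exact hall bit.toNat (by omega)

-- conditional-append fold is filter
theorem foldl_append_eq_filter (P : Int → Prop) [DecidablePred P] (l acc : List Int) :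
    l.foldl (fun out s => if P s then out ++ [s] else out) acc
      = acc ++ l.filter (fun s => decide (P s)) := by
  induction l generalizing acc with
  | nil => simp
  | cons b t ih =>
    simp only [List.foldl_cons, List.filter_cons]
    by_cases hb : P b
    · rw [if_pos hb, ih]
      simp [hb]
    · rw [if_neg hb, ih]
      simp [hb]

-- B's mask equals ↑(emaskN L1.toNat) for every L1
theorem mask_val (L1 : Int) :
    (if 0 < L1 then ((4 : Int) ^ L1.toNat - 1) / 3 else 0) = (emaskN L1.toNat : Int) := by
  by_cases h : 0 < L1
  · rw [if_pos h, mask_closed]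
  · rw [if_neg h, show L1.toNat = 0 from by omega]
    simp [emaskN]

-- ===== VERDICT =====
theorem build_eta_basis_spec : Claim_equal_build_eta_basis := by
  intro basis_k L1 _
  show build_eta_basis basis_k L1 = build_eta_basis_alt basis_k L1
  show basis_k.foldl (fun basis_et state_basis =>
      if ((PySem.List.pyRange 0 L1 1).foldl (fun e bit =>
        if IBITS state_basis (2 * bit) ≠ IBITS state_basis (2 * bit + 1) then 0 else e)
          (1 : Int) = 1)
      then basis_et ++ [state_basis] else basis_et) []
    = basis_k.filter (fun s => decide (PySem.Int.band (PySem.Int.bxor s (s >>> (1 : Nat)))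
        (if 0 < L1 then ((4 : Int) ^ L1.toNat - 1) / 3 else 0) = 0))
  rw [foldl_append_eq_filter (fun s =>
      (PySem.List.pyRange 0 L1 1).foldl (fun e bit =>
        if IBITS s (2 * bit) ≠ IBITS s (2 * bit + 1) then 0 else e) (1 : Int) = 1)
      basis_k [], List.nil_append]
  apply List.filter_congr
  intro s _
  simp only [decide_eq_decide]
  rw [flag_iff_pairs, mask_val, mask_test_iff]
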